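-- pv_equiv track=rewrite | github.com/jgoetzmann/Turing-Machine-OS | tools/agent_supervisor.py | format_commit_message
-- ===== SOURCE A (Python) =====
-- from typing import Iterable
--
-- def format_commit_message(task_ids: Iterable[str]) -> str:
--     ids = sorted(set(task_ids))
--     grouped: dict[str, list[str]] = {}
--
--     for task_id in ids:
--         phase, suffix = task_id.split("-", 1)
--         grouped.setdefault(phase, []).append(suffix)
--
--     parts: list[str] = []
--     for phase in sorted(grouped.keys()):
--         suffixes = sorted(grouped[phase])
--         if not suffixes:
--             continue
--         if len(suffixes) == 1:
--             parts.append(f"{phase}-{suffixes[0]}")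
--         else:
--             parts.append(f"{phase}-{','.join(suffixes)}")
--
--     return ",".join(parts)
-- ===== SOURCE B (Python) =====
-- def format_commit_message(task_ids):
--     pairs = [tid.split("-", 1) for tid in sorted(set(task_ids))]
--     phases = sorted({p for p, _ in pairs})
--     return ",".join(
--         "{}-{}".format(phase, ",".join(sorted(s for p, s in pairs if p == phase)))
--         for phase in phases
--     )
-- ===== Notes on version B (the rewrite author's own statement) =====
-- stated objective: simpler
-- what changed: B splits each sorted id once into a pair list and replaces A's dict-of-lists grouping, key re-sort and len==1 special case by a per-phase filter inside a join comprehension over the sorted phase set.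
import Mathlib
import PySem

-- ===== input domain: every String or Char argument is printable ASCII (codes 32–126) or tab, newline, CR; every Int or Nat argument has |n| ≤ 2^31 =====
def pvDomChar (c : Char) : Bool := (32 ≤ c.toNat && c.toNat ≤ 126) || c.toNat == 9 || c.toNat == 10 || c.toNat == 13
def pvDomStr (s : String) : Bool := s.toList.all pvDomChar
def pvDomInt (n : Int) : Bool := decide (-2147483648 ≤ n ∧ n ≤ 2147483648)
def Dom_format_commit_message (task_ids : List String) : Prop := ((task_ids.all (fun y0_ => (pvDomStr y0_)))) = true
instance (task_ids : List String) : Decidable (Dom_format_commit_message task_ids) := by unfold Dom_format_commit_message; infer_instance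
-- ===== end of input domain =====

-- B replaces A's dict-of-lists grouping (and its len==1 special case) by a split-once pair list
-- with a per-phase filter comprehension; objective: simpler. A's ValueError on ids without '-' is outside Pre_.

-- shared helper: `phase, suffix = tid.split("-", 1)` (both Pythons perform this unpacking;
-- the fallback branch is only reachable when tid contains no "-", which Pre_ excludes)
def pvSplit (tid : String) : String × String :=
  match PySem.Str.splitMax? tid "-" 1 with
  | some [p, s] => (p, s)
  | _ => (tid, "")

-- ===== PORT A =====
def format_commit_message (task_ids : List String) : String :=
  let ids := PySem.List.sorted (PySem.Set.ofList task_ids) (fun x => x) false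
  let grouped : PySem.Dict String (List String) :=
    ids.foldl (fun d tid => d.modify (pvSplit tid).1 [] (fun x => x ++ [(pvSplit tid).2]))
      PySem.Dict.empty
  let parts : List String :=
    (PySem.List.sorted grouped.keys (fun x => x) false).foldl (fun parts phase =>
      let suffixes := PySem.List.sorted (grouped.getD phase []) (fun x => x) false
      if suffixes = [] then parts
      else if suffixes.length = 1 then
        parts ++ [phase ++ "-" ++ (PySem.List.pyGet? suffixes 0).getD ""]
      else parts ++ [phase ++ "-" ++ PySem.Str.join "," suffixes]) []
  PySem.Str.join "," parts

-- ===== PORT B =====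
def format_commit_message_alt (task_ids : List String) : String :=
  let pairs := (PySem.List.sorted (PySem.Set.ofList task_ids) (fun x => x) false).map pvSplit
  let phases := PySem.List.sorted (PySem.Set.ofList (pairs.map Prod.fst)) (fun x => x) false
  PySem.Str.join "," (phases.map (fun phase =>
    phase ++ "-" ++ PySem.Str.join ","
      (PySem.List.sorted ((pairs.filter (fun p => p.1 == phase)).map Prod.snd) (fun x => x) false)))

-- ===== PRECONDITION & SPEC =====
-- Pre_ excludes exactly the ids without a "-": there Python A's tuple unpacking raises ValueError.
def Pre_format_commit_message (task_ids : List String) : Prop :=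
  ∀ tid ∈ task_ids, PySem.Str.isIn "-" tid = true
instance (task_ids : List String) : Decidable (Pre_format_commit_message task_ids) := by
  unfold Pre_format_commit_message; infer_instance
def pvWitness_format_commit_message : List String := ["p1-01", "p2-02", "p1-03"]

def Spec_format_commit_message (task_ids : List String) (out : String) : Prop := out = format_commit_message_alt task_ids
instance (task_ids : List String) (out : String) : Decidable (Spec_format_commit_message task_ids out) := by unfold Spec_format_commit_message; infer_instance

-- ===== CLAIM (what is proved, stated in full; the proofs are below) =====
def Claim_equal_format_commit_message : Prop := ∀ (task_ids : List String), Dom_format_commit_message task_ids → Pre_format_commit_message task_ids → Spec_format_commit_message task_ids (format_commit_message task_ids)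

-- ===== LEMMAS AND PROOFS =====

theorem pv_join_singleton (sep s : String) : PySem.Str.join sep [s] = s := by
  apply String.toList_inj.mp
  simp [PySem.Str.toList_join, PySem.Chars.join_singleton]

theorem pv_flatMap_singleton {α β : Type} (f : α → β) (l : List α) :
    l.flatMap (fun x => [f x]) = l.map f := by
  induction l with
  | nil => rfl
  | cons a t ih => simp [List.flatMap_cons, ih]

theorem pv_main (task_ids : List String) :
    format_commit_message task_ids = format_commit_message_alt task_ids := by
  simp only [format_commit_message, format_commit_message_alt]
  set ids := PySem.List.sorted (PySem.Set.ofList task_ids) (fun x => x) false with hids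
  set pairs := ids.map pvSplit with hpairs
  have hfold : ids.foldl (fun d tid => d.modify (pvSplit tid).1 [] (fun x => x ++ [(pvSplit tid).2])) (PySem.Dict.empty : PySem.Dict String (List String))
      = pairs.foldl (fun d p => d.modify p.1 [] (fun x => x ++ [p.2])) PySem.Dict.empty := by
    rw [hpairs, List.foldl_map]
  rw [hfold]
  set grouped := pairs.foldl (fun d p => d.modify p.1 [] (fun x => x ++ [p.2])) (PySem.Dict.empty : PySem.Dict String (List String)) with hgrouped
  have hkeys : grouped.keys = PySem.Set.ofList (pairs.map Prod.fst) := by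
    rw [hgrouped]
    rw [PySem.Dict.keys_foldl_modify_key pairs Prod.fst [] (fun _ p => fun x => x ++ [p.2]) PySem.Dict.empty]
    simp [PySem.Dict.empty, PySem.Dict.keys, PySem.Set.update_nil_left]
  have hgetD : ∀ phase, grouped.getD phase [] = (pairs.filter (fun p => p.1 == phase)).map Prod.snd := by
    intro phase
    rw [hgrouped, PySem.Dict.getD_foldl_modify_append pairs PySem.Dict.empty phase]
    simp [PySem.Dict.empty, PySem.Dict.getD, PySem.Dict.get?]
  rw [hkeys]
  set K := PySem.List.sorted (PySem.Set.ofList (pairs.map Prod.fst)) (fun x => x) false with hK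
  congr 1
  have hstep : ∀ (acc : List String), ∀ phase ∈ K,
      (fun parts phase =>
        if (PySem.List.sorted (grouped.getD phase []) (fun x => x) false) = [] then parts
        else if (PySem.List.sorted (grouped.getD phase []) (fun x => x) false).length = 1 then
          parts ++ [phase ++ "-" ++ (PySem.List.pyGet? (PySem.List.sorted (grouped.getD phase []) (fun x => x) false) 0).getD ""]
        else parts ++ [phase ++ "-" ++ PySem.Str.join "," (PySem.List.sorted (grouped.getD phase []) (fun x => x) false)]) acc phase
      = acc ++ [phase ++ "-" ++ PySem.Str.join ","
          (PySem.List.sorted ((pairs.filter (fun p => p.1 == phase)).map Prod.snd) (fun x => x) false)] := by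
    intro acc phase hmem
    simp only [hgetD phase]
    set suffixes := PySem.List.sorted ((pairs.filter (fun p => p.1 == phase)).map Prod.snd) (fun x => x) false with hsuf
    have hne : suffixes ≠ [] := by
      rw [hsuf, Ne, PySem.List.sorted_eq_nil_iff]
      have : phase ∈ pairs.map Prod.fst := by
        have := (PySem.List.mem_sorted _ _ _ phase).mp (hK ▸ hmem)
        exact (PySem.Set.mem_ofList _ _).mp this
      obtain ⟨p, hp, hp1⟩ := List.mem_map.mp this
      have : p ∈ pairs.filter (fun p => p.1 == phase) := by
        simp [List.mem_filter, hp, hp1]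
      intro hnil
      rw [List.map_eq_nil_iff] at hnil
      simp [hnil] at this
    rw [if_neg hne]
    by_cases h1 : suffixes.length = 1
    · obtain ⟨s, hs⟩ := List.length_eq_one_iff.mp h1
      rw [if_pos h1, hs]
      simp [PySem.List.pyGet?, PySem.List.pyIdx?, pv_join_singleton]
    · rw [if_neg h1]
  rw [PySem.List.foldl_congr_mem K _ _ [] hstep,
      PySem.List.foldl_append_eq_flatMap (fun phase => [phase ++ "-" ++ PySem.Str.join ","
          (PySem.List.sorted ((pairs.filter (fun p => p.1 == phase)).map Prod.snd) (fun x => x) false)]) K []]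
  rw [List.nil_append, pv_flatMap_singleton]

theorem format_commit_message_spec : Claim_equal_format_commit_message := by
  intro task_ids _ _
  exact pv_main task_ids
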